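-- pv_equiv track=rewrite | github.com/HuicheolMoon/Algorithm | Programmers/77885.py | solution
-- ===== SOURCE A (Python) =====
-- def solution(numbers):
--     answer = []
--     for number in numbers:
--         if number % 2 == 0:
--             answer.append(number + 1)
--             continue
--         bin_num = "0" + bin(number)[2:]
--         index = len(bin_num) - bin_num[::-1].index("0") - 1
--         f_bin_num = bin_num[:index] + bin_num[index:index+2][::-1] + bin_num[index+2:]
--         answer.append(int("0b" + f_bin_num, 2))
--     return answer
-- ===== SOURCE B (Python) =====
-- def solution(numbers):
--     answer = []
--     for n in numbers:
--         if n % 2 == 0: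
--             answer.append(n + 1)
--         else:
--             # lowest 0-bit of n sits just above a run of trailing 1-bits;
--             # moving it one place down adds 2**(run_length - 1)
--             step = 1
--             m = (n - 1) // 2
--             while m % 2 == 1:
--                 step *= 2
--                 m //= 2
--             answer.append(n + step)
--     return answer
-- ===== Notes on version B (the rewrite author's own statement) =====
-- stated objective: simpler
-- what changed: A builds the binary string with bin(), reverses it, searches .index("0"), swaps two characters by slicing and re-parses with int(...,2); B keeps the even case n+1 and for odd n computes the same result purely arithmetically, finding the length of the run of trailing 1-bits with a halving loop and adding 2**(run-1), with no strings at all (constant-factor win: no string allocation/parsing).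
-- outside the precondition, e.g. on solution([-3]): A raises ValueError, B returns [-2]
import Mathlib
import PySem

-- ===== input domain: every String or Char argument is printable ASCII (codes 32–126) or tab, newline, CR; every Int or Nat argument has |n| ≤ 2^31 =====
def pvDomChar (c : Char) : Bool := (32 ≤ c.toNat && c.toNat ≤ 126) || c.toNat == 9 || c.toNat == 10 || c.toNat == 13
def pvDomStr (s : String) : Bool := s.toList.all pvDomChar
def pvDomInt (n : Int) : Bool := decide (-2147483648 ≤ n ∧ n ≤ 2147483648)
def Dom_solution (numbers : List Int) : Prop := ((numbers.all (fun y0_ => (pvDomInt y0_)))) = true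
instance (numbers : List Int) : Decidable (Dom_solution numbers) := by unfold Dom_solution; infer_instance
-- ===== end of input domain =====

-- B replaces A's bin()/reverse/.index/slice/int(…,2) string surgery by a plain arithmetic
-- loop that finds the length of the run of trailing 1-bits (objective: simpler).

-- ===== PORT A =====
-- int("0b" + s, 2): hand-ported binary parse (exact on the '0'/'1' strings this port feeds it;
-- Python raises ValueError on other characters, reachable only for negative odd input, excluded by Pre_)
def solution_parseBin (cs : List Char) : Int :=
  cs.foldl (fun acc c => 2 * acc + (if c = '1' then 1 else 0)) 0

def solution_aElem (number : Int) : Int :=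
  -- bin_num = "0" + bin(number)[2:]
  let bin_num : List Char := '0' :: PySem.List.slice (PySem.Int.toBinChars0b number) (some 2) none
  -- index = len(bin_num) - bin_num[::-1].index("0") - 1
  -- (.index raises ValueError if '0' is absent — impossible here, bin_num starts with '0'; getD 0 is a totality guard only)
  let index : Int := PySem.List.len bin_num - (((PySem.List.index? bin_num.reverse '0').getD 0 : Nat) : Int) - 1
  -- f_bin_num = bin_num[:index] + bin_num[index:index+2][::-1] + bin_num[index+2:]
  let f_bin_num : List Char :=
    PySem.List.slice bin_num none (some index)
      ++ (PySem.List.slice bin_num (some index) (some (index + 2))).reverse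
      ++ PySem.List.slice bin_num (some (index + 2)) none
  -- int("0b" + f_bin_num, 2)
  solution_parseBin ('0' :: 'b' :: f_bin_num)

def solution (numbers : List Int) : List Int :=
  numbers.foldl (fun answer number =>
    if PySem.Int.mod number 2 == 0 then answer ++ [number + 1]
    else answer ++ [solution_aElem number]) []

-- ===== PORT B =====
-- while m % 2 == 1: step *= 2; m //= 2    (fuel m.natAbs + 1 is enough for every m ≥ 0,
-- each pass halves m; it is a totality guard only — Pre_ admits only m ≥ 0 here)
def solution_bLoop : Nat → Int → Int → Int × Int
  | 0, step, m => (step, m)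
  | fuel + 1, step, m =>
    if PySem.Int.mod m 2 == 1 then solution_bLoop fuel (step * 2) (PySem.Int.floordiv m 2)
    else (step, m)

def solution_bElem (n : Int) : Int :=
  let m := PySem.Int.floordiv (n - 1) 2
  n + (solution_bLoop (m.natAbs + 1) 1 m).1

def solution_alt (numbers : List Int) : List Int :=
  numbers.foldl (fun answer n =>
    if PySem.Int.mod n 2 == 0 then answer ++ [n + 1]
    else answer ++ [solution_bElem n]) []

-- ===== PRECONDITION & SPEC =====
-- Pre_ excludes negative odd elements, on which A raises ValueError
-- (bin(-3) = '-0b11' makes int("0b" + …, 2) parse garbage containing 'b').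
def Pre_solution (numbers : List Int) : Prop :=
  ∀ n ∈ numbers, n < 0 → PySem.Int.mod n 2 = 0
instance (numbers : List Int) : Decidable (Pre_solution numbers) := by
  unfold Pre_solution; infer_instance

def pvWitness_solution : List Int := [1, 2, 3, 8, 99, -4]

def Spec_solution (numbers : List Int) (out : List Int) : Prop := out = solution_alt numbers
instance (numbers : List Int) (out : List Int) : Decidable (Spec_solution numbers out) := by
  unfold Spec_solution; infer_instance

-- ===== CLAIM (what is proved, stated in full; the proofs are below) =====
def Claim_equal_solution : Prop :=
  ∀ (numbers : List Int), Dom_solution numbers → Pre_solution numbers →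
    Spec_solution numbers (solution numbers)

-- ===== LEMMAS AND PROOFS =====

-- length of the run of trailing 1-bits
def oneRun (m : Nat) : Nat :=
  if h : m % 2 = 1 then oneRun (m / 2) + 1 else 0
decreasing_by exact Nat.div_lt_self (by omega) (by omega)

-- the pure-list core of A's odd branch: swap the last '0' with its right neighbour
def swapAi (L : List Char) (i : Nat) : List Char :=
  L.take i ++ ((L.drop i).take 2).reverse ++ L.drop (i + 2)

def swapA (L : List Char) : List Char :=
  swapAi L (L.length - 1 - (PySem.List.index? L.reverse '0').getD 0)

-- ---- Nat.toDigits (core's bin digits) structure ----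

lemma toDigitsCore_acc (b : Nat) :
    ∀ (fuel n : Nat) (ds : List Char),
      Nat.toDigitsCore b fuel n ds = Nat.toDigitsCore b fuel n [] ++ ds := by
  intro fuel
  induction fuel with
  | zero => intro n ds; simp [Nat.toDigitsCore]
  | succ f ih =>
    intro n ds
    simp only [Nat.toDigitsCore]
    by_cases h : n / b = 0
    · simp [h]
    · simp only [h, if_false]
      rw [ih (n / b) ((n % b).digitChar :: ds), ih (n / b) [(n % b).digitChar]]
      simp

lemma toDigitsCore_fuel :
    ∀ (n f1 f2 : Nat), n < f1 → n < f2 →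
      Nat.toDigitsCore 2 f1 n [] = Nat.toDigitsCore 2 f2 n [] := by
  intro n
  induction n using Nat.strong_induction_on with
  | _ n ih =>
    intro f1 f2 h1 h2
    obtain ⟨g1, rfl⟩ : ∃ g1, f1 = g1 + 1 := ⟨f1 - 1, by omega⟩
    obtain ⟨g2, rfl⟩ : ∃ g2, f2 = g2 + 1 := ⟨f2 - 1, by omega⟩
    simp only [Nat.toDigitsCore]
    by_cases h : n / 2 = 0
    · simp [h]
    · simp only [h, if_false]
      rw [toDigitsCore_acc 2 g1, toDigitsCore_acc 2 g2]
      rw [ih (n / 2) (by omega) g1 g2 (by omega) (by omega)]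

lemma toDigits_two_step (n : Nat) (hn : 2 ≤ n) :
    Nat.toDigits 2 n = Nat.toDigits 2 (n / 2) ++ [if n % 2 = 1 then '1' else '0'] := by
  have hd : (n % 2).digitChar = if n % 2 = 1 then '1' else '0' := by
    have : n % 2 = 0 ∨ n % 2 = 1 := by omega
    rcases this with h | h <;> simp [h, Nat.digitChar]
  conv_lhs => unfold Nat.toDigits
  simp only [Nat.toDigitsCore]
  have h : ¬ n / 2 = 0 := by omega
  simp only [h, if_false]
  rw [toDigitsCore_acc 2 n (n / 2), toDigitsCore_fuel (n / 2) n (n / 2 + 1) (by omega) (by omega), hd]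
  rfl

lemma digits_odd_ends_one (m : Nat) (h : m % 2 = 1) :
    ∃ Q, Nat.toDigits 2 m = Q ++ ['1'] := by
  rcases Nat.lt_or_ge m 2 with hm | hm
  · interval_cases m
    · omega
    · exact ⟨[], by decide⟩
  · exact ⟨Nat.toDigits 2 (m / 2), by rw [toDigits_two_step m hm]; simp [h]⟩

-- ---- parseBin values ----

lemma parseBin_prefix (x : List Char) :
    solution_parseBin ('0' :: 'b' :: x) = solution_parseBin x := by
  simp [solution_parseBin]

lemma parseBin_cons_zero (x : List Char) :
    solution_parseBin ('0' :: x) = solution_parseBin x := by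
  simp [solution_parseBin]

lemma parseBin_append_singleton (g : List Char) (c : Char) :
    solution_parseBin (g ++ [c]) =
      2 * solution_parseBin g + (if c = '1' then 1 else 0) := by
  simp [solution_parseBin, List.foldl_append]

lemma parseBin_toDigits (n : Nat) : solution_parseBin (Nat.toDigits 2 n) = (n : Int) := by
  induction n using Nat.strong_induction_on with
  | _ n ih =>
    rcases Nat.lt_or_ge n 2 with hn | hn
    · interval_cases n <;> decide
    · rw [toDigits_two_step n hn, parseBin_append_singleton,
        ih (n / 2) (by omega)]
      have : n % 2 = 0 ∨ n % 2 = 1 := by omega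
      rcases this with h | h <;> simp [h] <;> omega

-- ---- swapA on the two shapes the induction meets ----

lemma swapA_even (P : List Char) : swapA (P ++ ['0', '1']) = P ++ ['1', '0'] := by
  have hidx : PySem.List.index? (P ++ ['0', '1']).reverse '0' = some 1 := by
    rw [show (P ++ ['0', '1']).reverse = '1' :: '0' :: P.reverse by simp]
    rw [PySem.List.index?_cons_of_ne ('0' :: P.reverse) (by decide),
      PySem.List.index?_cons_self]
    rfl
  unfold swapA
  rw [hidx]
  have hi : (P ++ ['0', '1']).length - 1 - (some 1).getD 0 = P.length := by
    simp
  rw [hi]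
  unfold swapAi
  rw [List.take_append_of_le_length (by simp), List.take_length,
      List.drop_append_of_le_length (le_refl _), List.drop_length]
  have h2 : (P ++ ['0', '1']).drop (P.length + 2) = [] := by
    apply List.drop_eq_nil_of_le; simp
  rw [h2]
  simp

lemma swapA_snoc_one (N : List Char) (h0 : '0' ∈ N) :
    swapA ((N ++ ['1']) ++ ['1']) = swapA (N ++ ['1']) ++ ['1'] := by
  obtain ⟨j, hj⟩ : ∃ j, PySem.List.index? N.reverse '0' = some j := by
    have hmem : '0' ∈ N.reverse := by simpa using h0
    exact Option.isSome_iff_exists.1 ((PySem.List.index?_isSome_iff _ _).2 hmem)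
  have hjlt : j < N.length := by
    obtain ⟨hk', -, -⟩ := PySem.List.getElem_of_index?_eq_some hj
    simpa using hk'
  have hNlen : 1 ≤ N.length := List.length_pos_of_mem h0
  have hidx1 : PySem.List.index? (N ++ ['1']).reverse '0' = some (j + 1) := by
    rw [show (N ++ ['1']).reverse = '1' :: N.reverse by simp,
      PySem.List.index?_cons_of_ne N.reverse (by decide), hj]
    rfl
  have hidx2 : PySem.List.index? ((N ++ ['1']) ++ ['1']).reverse '0' = some (j + 2) := by
    rw [show ((N ++ ['1']) ++ ['1']).reverse = '1' :: '1' :: N.reverse by simp,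
      PySem.List.index?_cons_of_ne ('1' :: N.reverse) (by decide),
      PySem.List.index?_cons_of_ne N.reverse (by decide), hj]
    rfl
  unfold swapA
  rw [hidx1, hidx2]
  simp only [Option.getD_some, List.length_append, List.length_cons, List.length_nil]
  have e1 : N.length + 1 + 1 - 1 - (j + 2) = N.length - 1 - j := by omega
  have e2 : N.length + 1 - 1 - (j + 1) = N.length - 1 - j := by omega
  rw [e1, e2]
  set i := N.length - 1 - j with hidef
  have hi : i + 2 ≤ N.length + 1 := by omega
  unfold swapAi
  have t1 : ((N ++ ['1']) ++ ['1']).take i = (N ++ ['1']).take i := by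
    rw [List.take_append_of_le_length (by simp; omega)]
  have t2 : ((N ++ ['1']) ++ ['1']).drop i = (N ++ ['1']).drop i ++ ['1'] := by
    rw [List.drop_append_of_le_length (by simp; omega)]
  have hlen : 2 ≤ ((N ++ ['1']).drop i).length := by simp; omega
  have t3 : ((N ++ ['1']).drop i ++ ['1']).take 2 = ((N ++ ['1']).drop i).take 2 := by
    rw [List.take_append_of_le_length hlen]
  have t4 : ((N ++ ['1']) ++ ['1']).drop (i + 2) = (N ++ ['1']).drop (i + 2) ++ ['1'] := by
    rw [List.drop_append_of_le_length (by simp; omega)]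
  rw [t1, t2, t3, t4]
  simp

-- ---- A's odd branch through swapA ----

lemma aElem_core (k : Nat) :
    solution_aElem (k : Int) = solution_parseBin (swapA ('0' :: Nat.toDigits 2 k)) := by
  have hbin : PySem.Int.toBinChars0b (k : Int) = '0' :: 'b' :: Nat.toDigits 2 k := by
    simp [PySem.Int.toBinChars0b]
  have hslice2 : PySem.List.slice ('0' :: 'b' :: Nat.toDigits 2 k) (some 2) none
      = Nat.toDigits 2 k := by
    rw [show (2 : Int) = ((2 : Nat) : Int) from rfl, PySem.List.slice_from_natCast]
    rfl
  set L : List Char := '0' :: Nat.toDigits 2 k with hL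
  obtain ⟨j, hj⟩ : ∃ j, PySem.List.index? L.reverse '0' = some j := by
    have hmem : '0' ∈ L.reverse := by simp [hL]
    exact Option.isSome_iff_exists.1 ((PySem.List.index?_isSome_iff _ _).2 hmem)
  have hjlt : j < L.length := by
    obtain ⟨hk', -, -⟩ := PySem.List.getElem_of_index?_eq_some hj
    simpa using hk'
  set i : Nat := L.length - 1 - j with hidef
  have hidx : PySem.List.len L - ((j : Nat) : Int) - 1 = ((i : Nat) : Int) := by
    rw [PySem.List.len_eq]
    push_cast [hidef]
    omega
  have hs1 : PySem.List.slice L none (some ((i : Nat) : Int)) = L.take i :=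
    PySem.List.slice_to_natCast L i
  have hs2 : PySem.List.slice L (some ((i : Nat) : Int)) (some (((i : Nat) : Int) + 2))
      = (L.drop i).take 2 := by
    rw [show ((i : Nat) : Int) + 2 = (((i + 2 : Nat)) : Int) by push_cast; ring,
      PySem.List.slice_natCast]
    congr 1
    omega
  have hs3 : PySem.List.slice L (some (((i : Nat) : Int) + 2)) none = L.drop (i + 2) := by
    rw [show ((i : Nat) : Int) + 2 = (((i + 2 : Nat)) : Int) by push_cast; ring,
      PySem.List.slice_from_natCast]
  simp only [solution_aElem, hbin, hslice2, ← hL, hj, Option.getD_some, hidx, hs1, hs2, hs3]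
  rw [parseBin_prefix]
  unfold swapA
  rw [hj]
  simp only [Option.getD_some, ← hidef]
  rfl

lemma aElem_odd : ∀ k : Nat, k % 2 = 1 →
    solution_aElem (k : Int) = (k : Int) + 2 ^ oneRun (k / 2) := by
  intro k
  induction k using Nat.strong_induction_on with
  | _ k ih =>
    intro hk
    rcases Nat.lt_or_ge k 3 with hk3 | hk3
    · have hk1 : k = 1 := by omega
      subst hk1
      have h1 : solution_aElem (1 : Int) = 2 := by decide
      have h2 : oneRun (1 / 2) = 0 := by rw [oneRun]; simp
      push_cast
      rw [h1, h2]
      norm_num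
    · set m := k / 2 with hm
      have hk2 : k = 2 * m + 1 := by omega
      have hm1 : 1 ≤ m := by omega
      rw [aElem_core k]
      have hT : Nat.toDigits 2 k = Nat.toDigits 2 m ++ ['1'] := by
        rw [toDigits_two_step k (by omega)]
        simp [hk, ← hm]
      by_cases hm2 : m % 2 = 1
      · obtain ⟨Q, hQ⟩ := digits_odd_ends_one m hm2
        have hshape : ('0' :: Nat.toDigits 2 k) = (('0' :: Q) ++ ['1']) ++ ['1'] := by
          rw [hT, hQ]; simp
        rw [hshape, swapA_snoc_one ('0' :: Q) (by simp), parseBin_append_singleton,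
          if_pos rfl]
        have hback : ('0' :: Q) ++ ['1'] = '0' :: Nat.toDigits 2 m := by
          rw [hQ]; simp
        rw [hback, ← aElem_core m, ih m (by omega) hm2]
        have hor : oneRun m = oneRun (m / 2) + 1 := by
          rw [oneRun]; simp [hm2]
        rw [hor, pow_succ]
        have : ((k : Int)) = 2 * (m : Int) + 1 := by exact_mod_cast congrArg (Nat.cast : Nat → Int) hk2
        rw [this]
        ring
      · have hm2' : 2 ≤ m := by omega
        have hTm : Nat.toDigits 2 m = Nat.toDigits 2 (m / 2) ++ ['0'] := by
          rw [toDigits_two_step m hm2']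
          simp [hm2]
        have hshape : ('0' :: Nat.toDigits 2 k) = ('0' :: Nat.toDigits 2 (m / 2)) ++ ['0', '1'] := by
          rw [hT, hTm]; simp
        rw [hshape, swapA_even,
          show ('0' :: Nat.toDigits 2 (m / 2)) ++ ['1', '0']
            = (('0' :: Nat.toDigits 2 (m / 2)) ++ ['1']) ++ ['0'] by simp,
          parseBin_append_singleton, parseBin_append_singleton,
          parseBin_cons_zero, parseBin_toDigits, if_pos rfl, if_neg (by decide)]
        have hor : oneRun m = 0 := by
          rw [oneRun]; simp [hm2]
        have hmd : (2 : Int) * ((m / 2 : Nat) : Int) = (m : Int) := by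
          have h22 : 2 * (m / 2) = m := by omega
          exact_mod_cast congrArg (Nat.cast : Nat → Int) h22
        have hki : ((k : Int)) = 2 * (m : Int) + 1 := by exact_mod_cast congrArg (Nat.cast : Nat → Int) hk2
        rw [hor, hki, ← hmd]
        ring

-- ---- B through oneRun ----

lemma bLoop_spec : ∀ m : Nat, ∀ fuel : Nat, m < fuel → ∀ step : Int,
    solution_bLoop fuel step (m : Int)
      = (step * 2 ^ oneRun m, ((m / 2 ^ oneRun m : Nat) : Int)) := by
  intro m
  induction m using Nat.strong_induction_on with
  | _ m ih =>
    intro fuel hf step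
    obtain ⟨g, rfl⟩ : ∃ g, fuel = g + 1 := ⟨fuel - 1, by omega⟩
    have hm2 : PySem.Int.mod (m : Int) 2 = ((m % 2 : Nat) : Int) := by
      exact_mod_cast PySem.Int.mod_natCast m 2
    rw [solution_bLoop]
    by_cases h : m % 2 = 1
    · have hcond : (PySem.Int.mod (m : Int) 2 == 1) = true := by
        rw [hm2, h]; rfl
      rw [hcond]
      simp only [if_true]
      have hfd : PySem.Int.floordiv (m : Int) 2 = ((m / 2 : Nat) : Int) := by
        exact_mod_cast PySem.Int.floordiv_natCast m 2
      rw [hfd, ih (m / 2) (by omega) g (by omega) (step * 2)]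
      have hor : oneRun m = oneRun (m / 2) + 1 := by
        rw [oneRun]; simp [h]
      rw [hor, pow_succ]
      simp only [Prod.mk.injEq]
      refine ⟨by ring, ?_⟩
      congr 1
      rw [Nat.div_div_eq_div_mul, mul_comm, pow_succ]
    · have hcond : (PySem.Int.mod (m : Int) 2 == 1) = false := by
        rw [hm2]
        have : m % 2 = 0 := by omega
        rw [this]
        rfl
      rw [hcond]
      have hor : oneRun m = 0 := by rw [oneRun]; simp [h]
      simp [hor]

lemma bElem_odd (k : Nat) (hk : k % 2 = 1) :
    solution_bElem (k : Int) = (k : Int) + 2 ^ oneRun (k / 2) := by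
  have hfd : PySem.Int.floordiv ((k : Int) - 1) 2 = ((k / 2 : Nat) : Int) := by
    have e1 : ((k : Int) - 1) = ((k - 1 : Nat) : Int) := by omega
    have e2 : PySem.Int.floordiv ((k - 1 : Nat) : Int) 2 = (((k - 1) / 2 : Nat) : Int) := by
      exact_mod_cast PySem.Int.floordiv_natCast (k - 1) 2
    rw [e1, e2, show (k - 1) / 2 = k / 2 from by omega]
  simp only [solution_bElem, hfd, Int.natAbs_natCast]
  rw [bLoop_spec (k / 2) (k / 2 + 1) (by omega) 1]
  simp

-- ---- glue ----

lemma elem_eq (n : Int) (h : n < 0 → PySem.Int.mod n 2 = 0)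
    (hm : ¬ PySem.Int.mod n 2 = 0) : solution_aElem n = solution_bElem n := by
  have h1 : PySem.Int.mod n 2 = 1 := by
    have := PySem.Int.mod_nonneg n (b := 2) (by omega)
    have := PySem.Int.mod_lt n (b := 2) (by omega)
    omega
  have hn : 0 ≤ n := by by_contra hc; exact hm (h (by omega))
  obtain ⟨k, rfl⟩ : ∃ k : Nat, n = (k : Int) := ⟨n.toNat, by omega⟩
  have hk : k % 2 = 1 := by
    have h2 : PySem.Int.mod (k : Int) 2 = ((k % 2 : Nat) : Int) := by
      exact_mod_cast PySem.Int.mod_natCast k 2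
    omega
  rw [aElem_odd k hk, bElem_odd k hk]

lemma foldl_eq (l : List Int) (hpre : ∀ n ∈ l, n < 0 → PySem.Int.mod n 2 = 0) :
    ∀ acc : List Int,
      l.foldl (fun answer number =>
        if PySem.Int.mod number 2 == 0 then answer ++ [number + 1]
        else answer ++ [solution_aElem number]) acc
      = l.foldl (fun answer n =>
        if PySem.Int.mod n 2 == 0 then answer ++ [n + 1]
        else answer ++ [solution_bElem n]) acc := by
  induction l with
  | nil => intro acc; rfl
  | cons x xs ih =>
    intro acc
    simp only [List.foldl_cons]
    by_cases hx : PySem.Int.mod x 2 = 0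
    · simp only [hx]
      exact ih (fun n hn => hpre n (List.mem_cons_of_mem x hn)) _
    · have hb : (PySem.Int.mod x 2 == 0) = false := beq_eq_false_iff_ne.2 hx
      rw [hb]
      simp only [Bool.false_eq_true, if_false]
      rw [elem_eq x (hpre x (List.mem_cons_self)) hx]
      exact ih (fun n hn => hpre n (List.mem_cons_of_mem x hn)) _

-- ===== VERDICT (by name: the statement is the Claim_ definition above) =====
theorem solution_spec : Claim_equal_solution := by
  intro numbers _hdom hpre
  unfold Spec_solution solution solution_alt
  exact foldl_eq numbers hpre []
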